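-- pv_equiv track=rewrite | github.com/Balaji-Kondasani/gfg_potd | Week-2/police_and_thieves.py | catchThieves
-- ===== SOURCE A (Python) =====
-- def catchThieves(arr, k):
--     count=0
--     j=0
--     marked=[False]*len(arr)
--     for i in range(len(arr)):
--         if arr[i]=='P':
--             if i-k<0:
--                 j=0
--             else:
--                 j=i-k
--             found=False
--
--             while j>=0 and j<=i:
--                 if j>=0 and arr[j]=='T' and not marked[j]:
--                     count+=1
--                     marked[j]=True
--                     found=True
--                     break
--                 else:
--                     j+=1
--             if not found:
--                 j=i+1
--                 while j<=len(arr)-1 and j<=i+k: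
--                     if j<=len(arr)-1 and arr[j]=='T' and not marked[j]:
--
--                         marked[j]=True
--                         count+=1
--                         break
--                     else:
--                         j+=1
--     return count
-- ===== SOURCE B (Python) =====
-- def _first_at_least(ts, x):
--     # index of the first element >= x in the ascending list ts (hand-rolled bisect_left)
--     lo, hi = 0, len(ts)
--     while lo < hi:
--         mid = (lo + hi) // 2
--         if ts[mid] < x:
--             lo = mid + 1
--         else:
--             hi = mid
--     return lo
--
-- def catchThieves(arr, k):
--     thieves = [i for i, c in enumerate(arr) if c == 'T']
--     count = 0
--     for i, c in enumerate(arr):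
--         if c == 'P':
--             r = _first_at_least(thieves, i - k)
--             if r < len(thieves) and thieves[r] <= i + k:
--                 thieves.pop(r)
--                 count += 1
--     return count
-- ===== Notes on version B (the rewrite author's own statement) =====
-- stated objective: alternative
-- what changed: Instead of rescanning a boolean marked array over the [i-k, i] and (i, i+k] windows for every police cell, B keeps one sorted list of still-unmarked thief indices and, per police, binary-searches it for the first thief >= i-k, catching and removing it when it is <= i+k.
import Mathlib
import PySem

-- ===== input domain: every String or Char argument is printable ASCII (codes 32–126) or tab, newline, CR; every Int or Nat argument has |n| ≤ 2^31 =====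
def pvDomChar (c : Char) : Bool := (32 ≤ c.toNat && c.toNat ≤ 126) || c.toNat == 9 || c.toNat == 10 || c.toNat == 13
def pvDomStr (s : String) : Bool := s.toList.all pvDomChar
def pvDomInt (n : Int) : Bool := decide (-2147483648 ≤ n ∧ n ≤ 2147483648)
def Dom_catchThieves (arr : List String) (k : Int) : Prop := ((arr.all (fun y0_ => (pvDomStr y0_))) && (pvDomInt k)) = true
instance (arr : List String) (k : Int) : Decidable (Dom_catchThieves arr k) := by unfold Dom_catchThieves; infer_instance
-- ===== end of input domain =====

-- B replaces A's per-police window rescans over a boolean `marked` array by one sorted list of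
-- unmarked thief indices, binary-searched and popped per police (objective: alternative).

-- ===== PORT A =====
-- inner 'while j>=0 and j<=i' loop of A (left search); returns (count, marked, found, j)
-- (fuel is a structural totality device only: it is seeded with the loop's iteration bound,
-- so the 0 arm is reached only when the loop guard is already false)
def aWhileL (arr : List String) (i : Int) (count : Int) (marked : List Bool) :
    Nat → Int → Int × List Bool × Bool × Int
  | 0, j => (count, marked, false, j)
  | fuel + 1, j =>
    if 0 ≤ j ∧ j ≤ i then
      if 0 ≤ j ∧ PySem.List.pyGetD arr j "" = "T" ∧ PySem.List.pyGetD marked j false = false then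
        (count + 1, PySem.List.pySetD marked j true, true, j)
      else aWhileL arr i count marked fuel (j + 1)
    else (count, marked, false, j)

-- inner 'while j<=len(arr)-1 and j<=i+k' loop of A (right search); returns (count, marked, j)
def aWhileR (arr : List String) (k : Int) (i : Int) (count : Int) (marked : List Bool) :
    Nat → Int → Int × List Bool × Int
  | 0, j => (count, marked, j)
  | fuel + 1, j =>
    if j ≤ PySem.List.len arr - 1 ∧ j ≤ i + k then
      if j ≤ PySem.List.len arr - 1 ∧ PySem.List.pyGetD arr j "" = "T" ∧ PySem.List.pyGetD marked j false = false then
        (count + 1, PySem.List.pySetD marked j true, j)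
      else aWhileR arr k i count marked fuel (j + 1)
    else (count, marked, j)

-- one iteration of A's 'for i in range(len(arr))' loop; state = (count, j, marked)
def aStep (arr : List String) (k : Int) (st : Int × Int × List Bool) (i : Int) : Int × Int × List Bool :=
  if PySem.List.pyGetD arr i "" = "P" then
    let j0 : Int := if i - k < 0 then 0 else i - k
    let r1 := aWhileL arr i st.1 st.2.2 ((i + 1 - j0).toNat) j0
    if r1.2.2.1 = false then
      let r2 := aWhileR arr k i r1.1 r1.2.1
        ((min (PySem.List.len arr - 1) (i + k) + 1 - (i + 1)).toNat) (i + 1)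
      (r2.1, r2.2.2, r2.2.1)
    else (r1.1, r1.2.2.2, r1.2.1)
  else st

def catchThieves (arr : List String) (k : Int) : Int :=
  ((PySem.List.pyRange 0 (PySem.List.len arr) 1).foldl (aStep arr k)
    (0, 0, List.replicate arr.length false)).1

-- ===== PORT B =====
-- hand-rolled bisect_left of Source B; lo/hi are nonnegative Python ints, kept as Nat
-- ((lo+hi)//2 on nonnegative ints is Nat division; ts[mid] is in range whenever hi ≤ len ts)
-- (the extra Nat argument is fuel, seeded with hi - lo = the initial search-interval width)
def firstAtLeast (ts : List Int) (x : Int) : Nat → Nat → Nat → Nat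
  | 0, lo, _ => lo
  | fuel + 1, lo, hi =>
    if lo < hi then
      let mid := (lo + hi) / 2
      if ts.getD mid 0 < x then firstAtLeast ts x fuel (mid + 1) hi
      else firstAtLeast ts x fuel lo mid
    else lo

-- one iteration of Source B's loop; state = (count, thieves)
def bStep (k : Int) (st : Int × List Int) (p : Int × String) : Int × List Int :=
  if p.2 = "P" then
    let r := firstAtLeast st.2 (p.1 - k) st.2.length 0 st.2.length
    if r < st.2.length ∧ st.2.getD r 0 ≤ p.1 + k then
      match PySem.List.pop? st.2 (r : Int) with
      | some res => (st.1 + 1, res.2)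
      | none => st   -- unreachable: r < len st.2
    else st
  else st

def catchThieves_alt (arr : List String) (k : Int) : Int :=
  ((PySem.List.enumerate arr).foldl (bStep k)
    (0, (PySem.List.enumerate arr).filterMap (fun p => if p.2 = "T" then some p.1 else none))).1

-- ===== PRECONDITION & SPEC =====
def Spec_catchThieves (arr : List String) (k : Int) (out : Int) : Prop := out = catchThieves_alt arr k
instance (arr : List String) (k : Int) (out : Int) : Decidable (Spec_catchThieves arr k out) := by unfold Spec_catchThieves; infer_instance

-- ===== CLAIM (what is proved, stated in full; the proofs are below) =====
def Claim_equal_catchThieves : Prop := ∀ (arr : List String) (k : Int), Dom_catchThieves arr k → Spec_catchThieves arr k (catchThieves arr k)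

-- ===== LEMMAS AND PROOFS =====

-- position t holds an unmarked thief
def QT (arr : List String) (m : List Bool) (t : Int) : Prop :=
  PySem.List.pyGetD arr t "" = "T" ∧ PySem.List.pyGetD m t false = false

-- the sorted list of indices of unmarked thieves
def unm (arr : List String) (m : List Bool) : List Int :=
  (PySem.List.enumerate arr).filterMap
    (fun p => if p.2 = "T" ∧ PySem.List.pyGetD m p.1 false = false then some p.1 else none)

theorem mem_unm (arr : List String) (m : List Bool) (t : Int) :
    t ∈ unm arr m ↔ 0 ≤ t ∧ t < PySem.List.len arr ∧ QT arr m t := by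
  unfold unm QT
  rw [List.mem_filterMap]
  constructor
  · rintro ⟨p, hp, hf⟩
    rcases (PySem.List.mem_enumerate_iff _ _ _).1 hp with ⟨n, hn, rfl⟩
    split at hf
    · rename_i hc
      simp only [Option.some.injEq] at hf
      subst hf
      simp only [zero_add] at hc ⊢
      refine ⟨by positivity, ?_, ?_, hc.2⟩
      · simp only [PySem.List.len_eq]; exact_mod_cast hn
      · rw [PySem.List.pyGetD_natCast, List.getD_eq_getElem _ _ hn]; exact hc.1
    · exact absurd hf (by simp)
  · rintro ⟨h0, hlen, hT, hM⟩
    simp only [PySem.List.len_eq] at hlen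
    have hn : t.toNat < arr.length := by omega
    refine ⟨((0 : Int) + t.toNat, arr[t.toNat]), (PySem.List.mem_enumerate_iff _ _ _).2 ⟨t.toNat, hn, rfl⟩, ?_⟩
    have ht : ((0 : Int) + t.toNat) = t := by omega
    rw [ht]
    have harr : PySem.List.pyGetD arr t "" = arr[t.toNat] :=
      PySem.List.pyGetD_eq_getElem (xs := arr) (i := t) (d := "") h0
        (by simpa [PySem.List.len_eq] using hlen)
    simp [harr.symm.trans hT, hM]

theorem pairwise_unm (arr : List String) (m : List Bool) : (unm arr m).Pairwise (· < ·) := by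
  unfold unm
  rw [List.pairwise_filterMap]
  refine (PySem.List.pairwise_lt_enumerate arr 0).imp ?_
  intro p q hpq b hb b' hb'
  split at hb <;> split at hb' <;> simp_all

theorem filterMap_erase (t : Int) : ∀ (l : List (Int × String)) (f f' : Int × String → Option Int),
    (∀ p ∈ l, p.1 ≠ t → f' p = f p) → (∀ p ∈ l, p.1 = t → f p = some p.1 ∧ f' p = none) →
    (∀ p ∈ l, ∀ v, f p = some v → v = p.1) → l.Pairwise (fun p q => p.1 < q.1) →
    l.filterMap f' = (l.filterMap f).erase t := by
  intro l
  induction l with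
  | nil => simp
  | cons p l ih =>
    intro f f' hagree ht hself hpw
    rw [List.filterMap_cons, List.filterMap_cons]
    by_cases hp : p.1 = t
    · obtain ⟨hf, hf'⟩ := ht p (List.mem_cons_self) hp
      rw [hf, hf', hp]
      have hcong : l.filterMap f' = l.filterMap f :=
        List.filterMap_congr (fun q hq =>
          hagree q (List.mem_cons_of_mem _ hq)
            (by have := (List.pairwise_cons.1 hpw).1 q hq; omega))
      rw [hcong, List.erase_cons_head]
    · rw [hagree p (List.mem_cons_self) hp]
      cases hfp : f p with
      | none =>
        exact ih f f' (fun q hq => hagree q (List.mem_cons_of_mem _ hq))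
          (fun q hq => ht q (List.mem_cons_of_mem _ hq))
          (fun q hq => hself q (List.mem_cons_of_mem _ hq)) (List.pairwise_cons.1 hpw).2
      | some v =>
        have hv : v = p.1 := hself p (List.mem_cons_self) v hfp
        rw [List.erase_cons_tail (by simp [hv, hp]),
          ih f f' (fun q hq => hagree q (List.mem_cons_of_mem _ hq))
            (fun q hq => ht q (List.mem_cons_of_mem _ hq))
            (fun q hq => hself q (List.mem_cons_of_mem _ hq)) (List.pairwise_cons.1 hpw).2]

theorem nodup_unm (arr : List String) (m : List Bool) : (unm arr m).Nodup :=
  (pairwise_unm arr m).imp (fun h => ne_of_lt h)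

theorem unm_set (arr : List String) (m : List Bool) (t : Int) (r : Nat)
    (hm : m.length = arr.length) (hr : r < (unm arr m).length)
    (ht : (unm arr m).getD r 0 = t) :
    unm arr (PySem.List.pySetD m t true) = (unm arr m).eraseIdx r := by
  rw [List.getD_eq_getElem _ _ hr] at ht
  have htmem : t ∈ unm arr m := ht ▸ List.getElem_mem hr
  obtain ⟨ht0, htlen, hQT, hQM⟩ := (mem_unm arr m t).1 htmem
  have htn : ((t.toNat : Int)) = t := by omega
  have htm : t.toNat < m.length := by
    simp only [PySem.List.len_eq] at htlen; omega
  have hset : ∀ (s : Int), 0 ≤ s → PySem.List.pyGetD (PySem.List.pySetD m t true) s false =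
      if s = t then true else PySem.List.pyGetD m s false := by
    intro s hs
    have hsn : ((s.toNat : Int)) = s := by omega
    rw [← htn, ← hsn, PySem.List.pyGetD_pySetD_natCast m t.toNat s.toNat true false htm]
    by_cases h : s.toNat = t.toNat
    · rw [if_pos h, if_pos (by omega)]
    · rw [if_neg h, if_neg (by omega)]
  have hidx : List.idxOf t (unm arr m) = r :=
    ht ▸ List.Nodup.idxOf_getElem (nodup_unm arr m) r hr
  rw [← List.erase_eq_eraseIdx_of_idxOf hidx]
  unfold unm
  refine filterMap_erase t _ _ _ ?_ ?_ ?_ (PySem.List.pairwise_lt_enumerate arr 0)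
  · intro p hp hne
    rcases (PySem.List.mem_enumerate_iff _ _ _).1 hp with ⟨n, hn, rfl⟩
    simp only at hne ⊢
    rw [hset _ (by positivity), if_neg hne]
  · intro p hp hpt
    rcases (PySem.List.mem_enumerate_iff _ _ _).1 hp with ⟨n, hn, rfl⟩
    simp only at hpt ⊢
    have harr : arr[n] = "T" := by
      have hx : PySem.List.pyGetD arr ((0:Int) + n) "" = arr[n] := by
        rw [zero_add, PySem.List.pyGetD_natCast, List.getD_eq_getElem _ _ hn]
      rw [← hx, hpt]; exact hQT
    constructor
    · rw [if_pos ⟨harr, by rw [hpt]; exact hQM⟩, hpt]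
    · rw [if_neg]
      rintro ⟨-, hcon⟩
      rw [hset _ (by positivity), if_pos hpt] at hcon
      simp at hcon
  · intro p hp v hv
    split at hv
    · exact (Option.some.injEq _ _ ▸ hv).symm
    · exact absurd hv (by simp)

theorem sorted_getD_mono (ts : List Int) (hs : ts.Pairwise (· < ·)) (a b : Nat)
    (hab : a ≤ b) (hb : b < ts.length) : ts.getD a 0 ≤ ts.getD b 0 := by
  rw [List.getD_eq_getElem _ _ (by omega), List.getD_eq_getElem _ _ hb]
  rcases Nat.eq_or_lt_of_le hab with rfl | h
  · exact le_refl _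
  · exact le_of_lt ((List.pairwise_iff_getElem.1 hs) a b (by omega) hb h)

theorem fal_spec (ts : List Int) (x : Int) (hs : ts.Pairwise (· < ·)) :
    ∀ fuel lo hi, hi - lo ≤ fuel → hi ≤ ts.length → lo ≤ hi →
    (∀ a, a < lo → ts.getD a 0 < x) → (∀ a, hi ≤ a → a < ts.length → x ≤ ts.getD a 0) →
    firstAtLeast ts x fuel lo hi ≤ ts.length ∧
    (∀ a, a < firstAtLeast ts x fuel lo hi → ts.getD a 0 < x) ∧
    (∀ a, firstAtLeast ts x fuel lo hi ≤ a → a < ts.length → x ≤ ts.getD a 0) := by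
  intro fuel
  induction fuel with
  | zero =>
    intro lo hi hf hhi hlohi hlo hhi2
    simp only [firstAtLeast]
    exact ⟨by omega, hlo, fun a ha h2 => hhi2 a (by omega) h2⟩
  | succ n ih =>
    intro lo hi hf hhi hlohi hlo hhi2
    rw [firstAtLeast]
    by_cases h : lo < hi
    · rw [if_pos h]
      simp only
      split
      · rename_i hmid
        refine ih ((lo + hi) / 2 + 1) hi (by omega) hhi (by omega) ?_ hhi2
        intro a ha
        exact lt_of_le_of_lt (sorted_getD_mono ts hs a ((lo + hi) / 2) (by omega) (by omega)) hmid
      · rename_i hmid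
        push Not at hmid
        refine ih lo ((lo + hi) / 2) (by omega) (by omega) (by omega) hlo ?_
        intro a ha halen
        exact le_trans hmid (sorted_getD_mono ts hs ((lo + hi) / 2) a ha halen)
    · rw [if_neg h]
      exact ⟨by omega, hlo, fun a ha h2 => hhi2 a (by omega) h2⟩

theorem whileL_found (arr : List String) (i : Int) (c : Int) (m : List Bool) (t : Int)
    (ht0 : 0 ≤ t) (hti : t ≤ i) (hQ : QT arr m t) :
    ∀ fuel j, 0 ≤ j → j ≤ t → (t + 1 - j).toNat ≤ fuel →
    (∀ s, j ≤ s → s < t → ¬ QT arr m s) →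
    aWhileL arr i c m fuel j = (c + 1, PySem.List.pySetD m t true, true, t) := by
  intro fuel
  induction fuel with
  | zero =>
    intro j hj0 hjt hf hmin
    exact absurd hf (by omega)
  | succ n ih =>
    intro j hj0 hjt hf hmin
    rw [aWhileL, if_pos ⟨hj0, by omega⟩]
    by_cases hjt' : j = t
    · subst hjt'
      rw [if_pos ⟨hj0, hQ.1, hQ.2⟩]
    · have hlt : j < t := lt_of_le_of_ne hjt hjt'
      rw [if_neg ?_]
      · exact ih (j + 1) (by omega) (by omega) (by omega) (fun s hs => hmin s (by omega))
      · rintro ⟨-, h1, h2⟩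
        exact hmin j le_rfl hlt ⟨h1, h2⟩

theorem whileL_none (arr : List String) (i : Int) (c : Int) (m : List Bool) :
    ∀ fuel j, (i + 1 - j).toNat ≤ fuel → (∀ s, j ≤ s → s ≤ i → ¬ (0 ≤ s ∧ QT arr m s)) →
    ∃ jf, aWhileL arr i c m fuel j = (c, m, false, jf) := by
  intro fuel
  induction fuel with
  | zero =>
    intro j hf h
    exact ⟨j, rfl⟩
  | succ n ih =>
    intro j hf h
    by_cases hg : 0 ≤ j ∧ j ≤ i
    · rw [aWhileL, if_pos hg, if_neg ?_]
      · exact ih (j + 1) (by omega) (fun s hs => h s (by omega))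
      · rintro ⟨h0, h1, h2⟩
        exact h j le_rfl hg.2 ⟨h0, h1, h2⟩
    · refine ⟨j, ?_⟩
      rw [aWhileL, if_neg hg]

theorem whileR_found (arr : List String) (k : Int) (i : Int) (c : Int) (m : List Bool) (t : Int)
    (ht1 : t ≤ PySem.List.len arr - 1) (ht2 : t ≤ i + k) (hQ : QT arr m t) :
    ∀ fuel j, j ≤ t → (t + 1 - j).toNat ≤ fuel → (∀ s, j ≤ s → s < t → ¬ QT arr m s) →
    aWhileR arr k i c m fuel j = (c + 1, PySem.List.pySetD m t true, t) := by
  intro fuel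
  induction fuel with
  | zero =>
    intro j hjt hf hmin
    exact absurd hf (by omega)
  | succ n ih =>
    intro j hjt hf hmin
    rw [aWhileR, if_pos ⟨by omega, by omega⟩]
    by_cases hjt' : j = t
    · subst hjt'
      rw [if_pos ⟨ht1, hQ.1, hQ.2⟩]
    · have hlt : j < t := lt_of_le_of_ne hjt hjt'
      rw [if_neg ?_]
      · exact ih (j + 1) (by omega) (by omega) (fun s hs => hmin s (by omega))
      · rintro ⟨-, h1, h2⟩
        exact hmin j le_rfl hlt ⟨h1, h2⟩

theorem whileR_none (arr : List String) (k : Int) (i : Int) (c : Int) (m : List Bool) :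
    ∀ fuel j, (min (PySem.List.len arr - 1) (i + k) + 1 - j).toNat ≤ fuel →
    (∀ s, j ≤ s → s ≤ PySem.List.len arr - 1 → s ≤ i + k → ¬ QT arr m s) →
    ∃ jf, aWhileR arr k i c m fuel j = (c, m, jf) := by
  intro fuel
  induction fuel with
  | zero =>
    intro j hf h
    exact ⟨j, rfl⟩
  | succ n ih =>
    intro j hf h
    by_cases hg : j ≤ PySem.List.len arr - 1 ∧ j ≤ i + k
    · rw [aWhileR, if_pos hg, if_neg ?_]
      · exact ih (j + 1) (by omega) (fun s hs => h s (by omega))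
      · rintro ⟨h0, h1, h2⟩
        exact h j le_rfl h0 hg.2 ⟨h1, h2⟩
    · refine ⟨j, ?_⟩
      rw [aWhileR, if_neg hg]

theorem step_eq (arr : List String) (k : Int) (i : Int) (hi0 : 0 ≤ i)
    (hin : i < PySem.List.len arr) (c jA : Int) (m : List Bool) (hm : m.length = arr.length) :
    (aStep arr k (c, jA, m) i).2.2.length = arr.length ∧
    (aStep arr k (c, jA, m) i).1 = (bStep k (c, unm arr m) (i, PySem.List.pyGetD arr i "")).1 ∧
    unm arr (aStep arr k (c, jA, m) i).2.2 = (bStep k (c, unm arr m) (i, PySem.List.pyGetD arr i "")).2 := by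
  by_cases hP : PySem.List.pyGetD arr i "" = "P"
  case neg =>
    simp only [aStep, bStep, if_neg hP]
    exact ⟨hm, trivial, trivial⟩
  case pos =>
  have hpw := pairwise_unm arr m
  obtain ⟨P1, P2, P3⟩ := fal_spec (unm arr m) (i - k) hpw (unm arr m).length 0
    (unm arr m).length (by omega) le_rfl (Nat.zero_le _)
    (fun a ha => absurd ha (Nat.not_lt_zero a)) (fun a h1 h2 => absurd h2 (by omega))
  have F2 : firstAtLeast (unm arr m) (i - k) (unm arr m).length 0 (unm arr m).length < (unm arr m).length →
      ∀ s ∈ unm arr m, i - k ≤ s →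
      (unm arr m).getD (firstAtLeast (unm arr m) (i - k) (unm arr m).length 0 (unm arr m).length) 0 ≤ s := by
    intro hrl s hs hsk
    obtain ⟨a, ha, rfl⟩ := List.mem_iff_getElem.1 hs
    rcases Nat.lt_or_ge a (firstAtLeast (unm arr m) (i - k) (unm arr m).length 0 (unm arr m).length) with h | h
    · have h2 := P2 a h
      rw [List.getD_eq_getElem _ _ ha] at h2
      omega
    · have h2 := sorted_getD_mono _ hpw _ a h ha
      rwa [List.getD_eq_getElem _ _ ha] at h2
  have F3 : ¬ firstAtLeast (unm arr m) (i - k) (unm arr m).length 0 (unm arr m).length < (unm arr m).length →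
      ∀ s ∈ unm arr m, s < i - k := by
    intro hrl s hs
    obtain ⟨a, ha, rfl⟩ := List.mem_iff_getElem.1 hs
    have h2 := P2 a (by omega)
    rwa [List.getD_eq_getElem _ _ ha] at h2
  have memu : ∀ s : Int, 0 ≤ s → s < PySem.List.len arr → QT arr m s → s ∈ unm arr m :=
    fun s a b c => (mem_unm arr m s).2 ⟨a, b, c⟩
  simp only [aStep, bStep, hP, if_pos]
  by_cases hr : firstAtLeast (unm arr m) (i - k) (unm arr m).length 0 (unm arr m).length < (unm arr m).length ∧
      (unm arr m).getD (firstAtLeast (unm arr m) (i - k) (unm arr m).length 0 (unm arr m).length) 0 ≤ i + k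
  case pos =>
    rw [if_pos hr]
    have htmem : (unm arr m).getD (firstAtLeast (unm arr m) (i - k) (unm arr m).length 0 (unm arr m).length) 0 ∈ unm arr m := by
      rw [List.getD_eq_getElem _ _ hr.1]
      exact List.getElem_mem hr.1
    obtain ⟨ht0, htlen, hQ⟩ := (mem_unm arr m _).1 htmem
    have hik : i - k ≤ (unm arr m).getD (firstAtLeast (unm arr m) (i - k) (unm arr m).length 0 (unm arr m).length) 0 :=
      P3 _ le_rfl hr.1
    have hpop : PySem.List.pop? (unm arr m)
        ((firstAtLeast (unm arr m) (i - k) (unm arr m).length 0 (unm arr m).length : Nat) : Int) =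
        some ((unm arr m)[firstAtLeast (unm arr m) (i - k) (unm arr m).length 0 (unm arr m).length],
          (unm arr m).eraseIdx (firstAtLeast (unm arr m) (i - k) (unm arr m).length 0 (unm arr m).length)) :=
      PySem.List.pop?_natCast _ _ hr.1
    rw [hpop]
    have hunm : unm arr (PySem.List.pySetD m
        ((unm arr m).getD (firstAtLeast (unm arr m) (i - k) (unm arr m).length 0 (unm arr m).length) 0) true) =
        (unm arr m).eraseIdx (firstAtLeast (unm arr m) (i - k) (unm arr m).length 0 (unm arr m).length) :=
      unm_set arr m _ _ hm hr.1 rfl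
    have hlen2 : (PySem.List.pySetD m
        ((unm arr m).getD (firstAtLeast (unm arr m) (i - k) (unm arr m).length 0 (unm arr m).length) 0) true).length
        = arr.length := by
      rw [PySem.List.length_pySetD]
      exact hm
    by_cases hti : (unm arr m).getD (firstAtLeast (unm arr m) (i - k) (unm arr m).length 0 (unm arr m).length) 0 ≤ i
    · have hL := whileL_found arr i c m _ ht0 hti hQ
        ((i + 1 - (if i - k < 0 then (0:Int) else i - k)).toNat)
        (if i - k < 0 then (0:Int) else i - k)
        (by split <;> omega) (by split <;> omega) (by split <;> omega) ?_
      · rw [hL]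
        simp only [Bool.true_eq_false, reduceIte]
        exact ⟨hlen2, trivial, hunm⟩
      · intro s hs hst hQs
        have hs0 : (0:Int) ≤ s := by
          revert hs; split <;> omega
        have hslen : s < PySem.List.len arr := by
          simp only [PySem.List.len_eq] at htlen ⊢
          omega
        have hsk : i - k ≤ s := by revert hs; split <;> omega
        have := F2 hr.1 s (memu s hs0 hslen hQs) hsk
        omega
    · have hL := whileL_none arr i c m _ (if i - k < 0 then (0:Int) else i - k) le_rfl ?_
      · obtain ⟨jf, hLe⟩ := hL
        rw [hLe]
        have hR := whileR_found arr k i c m _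
          (by simp only [PySem.List.len_eq] at htlen ⊢; omega) hr.2 hQ
          ((min (PySem.List.len arr - 1) (i + k) + 1 - (i + 1)).toNat) (i + 1)
          (by omega)
          (by simp only [PySem.List.len_eq] at htlen ⊢; omega) ?_
        · rw [hR]
          simp only [reduceIte]
          exact ⟨hlen2, trivial, hunm⟩
        · intro s hs hst hQs
          have hs0 : (0:Int) ≤ s := by omega
          have hslen : s < PySem.List.len arr := by
            simp only [PySem.List.len_eq] at htlen ⊢
            omega
          have hsk : i - k ≤ s := by omega
          have := F2 hr.1 s (memu s hs0 hslen hQs) hsk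
          omega
      · rintro s hs1 hs2 ⟨hs0, hQs⟩
        have hslen : s < PySem.List.len arr := by
          simp only [PySem.List.len_eq] at hin ⊢
          omega
        have hsk : i - k ≤ s := by revert hs1; split <;> omega
        have := F2 hr.1 s (memu s hs0 hslen hQs) hsk
        omega
  case neg =>
    rw [if_neg hr]
    have hLside : ∀ s, (if i - k < 0 then (0:Int) else i - k) ≤ s → s ≤ i → ¬ (0 ≤ s ∧ QT arr m s) := by
      rintro s hs1 hs2 ⟨hs0, hQs⟩
      have hslen : s < PySem.List.len arr := by
        simp only [PySem.List.len_eq] at hin ⊢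
        omega
      have hsk : i - k ≤ s := by revert hs1; split <;> omega
      have hsmem := memu s hs0 hslen hQs
      rcases Decidable.em (firstAtLeast (unm arr m) (i - k) (unm arr m).length 0 (unm arr m).length < (unm arr m).length) with hrl | hrl
      · have hnk : ¬ (unm arr m).getD (firstAtLeast (unm arr m) (i - k) (unm arr m).length 0 (unm arr m).length) 0 ≤ i + k :=
          fun hcon => hr ⟨hrl, hcon⟩
        have := F2 hrl s hsmem hsk
        omega
      · have := F3 hrl s hsmem
        omega
    have hRside : ∀ s, (i + 1 : Int) ≤ s → s ≤ PySem.List.len arr - 1 → s ≤ i + k → ¬ QT arr m s := by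
      intro s hs1 hs2 hs3 hQs
      have hs0 : (0:Int) ≤ s := by omega
      have hslen : s < PySem.List.len arr := by
        simp only [PySem.List.len_eq] at hs2 ⊢
        omega
      have hsmem := memu s hs0 hslen hQs
      rcases Decidable.em (firstAtLeast (unm arr m) (i - k) (unm arr m).length 0 (unm arr m).length < (unm arr m).length) with hrl | hrl
      · have hnk : ¬ (unm arr m).getD (firstAtLeast (unm arr m) (i - k) (unm arr m).length 0 (unm arr m).length) 0 ≤ i + k :=
          fun hcon => hr ⟨hrl, hcon⟩
        have := F2 hrl s hsmem (by omega)
        omega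
      · have := F3 hrl s hsmem
        omega
    obtain ⟨jf, hLe⟩ := whileL_none arr i c m _ (if i - k < 0 then (0:Int) else i - k) le_rfl hLside
    rw [hLe]
    obtain ⟨jf2, hRe⟩ := whileR_none arr k i c m _ (i + 1) le_rfl hRside
    rw [hRe]
    simp only [reduceIte]
    exact ⟨hm, trivial, trivial⟩

theorem fold_inv (arr : List String) (k : Int) :
    ∀ (l : List Int), (∀ i ∈ l, 0 ≤ i ∧ i < PySem.List.len arr) →
    ∀ (c jA : Int) (m : List Bool), m.length = arr.length →
    (l.foldl (aStep arr k) (c, jA, m)).1 =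
      (l.foldl (fun st i => bStep k st (i, PySem.List.pyGetD arr i "")) (c, unm arr m)).1 := by
  intro l
  induction l with
  | nil => intro _ c jA m _; rfl
  | cons i l ih =>
    intro hb c jA m hm
    simp only [List.foldl_cons]
    obtain ⟨hlen, hc, hu⟩ := step_eq arr k i (hb i (List.mem_cons_self)).1
      (hb i (List.mem_cons_self)).2 c jA m hm
    have hbstep : bStep k (c, unm arr m) (i, PySem.List.pyGetD arr i "") =
        ((aStep arr k (c, jA, m) i).1, unm arr (aStep arr k (c, jA, m) i).2.2) :=
      Prod.ext hc.symm hu.symm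
    rw [hbstep]
    have := ih (fun x hx => hb x (List.mem_cons_of_mem _ hx)) (aStep arr k (c, jA, m) i).1
      (aStep arr k (c, jA, m) i).2.1 (aStep arr k (c, jA, m) i).2.2 hlen
    simpa using this

theorem unm_init (arr : List String) :
    unm arr (List.replicate arr.length false) =
      (PySem.List.enumerate arr).filterMap (fun p => if p.2 = "T" then some p.1 else none) := by
  unfold unm
  refine List.filterMap_congr ?_
  intro p hp
  rcases (PySem.List.mem_enumerate_iff _ _ _).1 hp with ⟨n, hn, rfl⟩
  have : PySem.List.pyGetD (List.replicate arr.length false) ((0 : Int) + n) false = false := by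
    rw [zero_add, PySem.List.pyGetD_natCast]
    rcases Nat.lt_or_ge n arr.length with h | h
    · rw [List.getD_eq_getElem _ _ (by simpa using h)]; simp
    · rw [List.getD_eq_default _ _ (by simpa using h)]
  simp only [this, and_true]

-- ===== VERDICT (by name: the statement is the Claim_ definition above) =====
theorem catchThieves_spec : Claim_equal_catchThieves := by
  intro arr k _
  unfold Spec_catchThieves catchThieves catchThieves_alt
  rw [← unm_init arr, PySem.List.enumerate_eq_map_pyRange (d := ""), List.foldl_map]
  exact fold_inv arr k _ (fun i hi => by
      rcases (PySem.List.mem_pyRange_one).1 hi with ⟨h1, h2⟩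
      exact ⟨h1, h2⟩) 0 0 _ (by simp)
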